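-- pv_equiv track=rewrite | github.com/amazon-science/unique-batches | src/unique_batches/data/deduplicators/batchwise.py | compute_per_batch_schedule_occurrences
-- ===== SOURCE A (Python) =====
-- from typing import List, Tuple
--
-- def compute_per_batch_schedule_occurrences(
--     samples: List, batch_size: int
-- ) -> Tuple[List[int], List[List[float]]]:
--
--     occurrences_per_batch = list()
--     schedule_per_batch = list()
--
--     sample_seen_in_batch = set()
--     utt_pos_in_batch = dict()
--
--     batch_occurrences = list()
--     batch_schedule = list()
--
--     batch_capacity = batch_size
--
--     for sample_ind, sample in enumerate(samples):
--         if sample not in sample_seen_in_batch: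
--
--             batch_schedule.append(sample_ind)
--             sample_seen_in_batch.add(sample)
--             utt_pos_in_batch[sample] = len(batch_occurrences)
--
--             batch_occurrences.append(1)
--             batch_capacity -= 1
--
--         else:
--             batch_idx = utt_pos_in_batch[sample]
--             batch_occurrences[batch_idx] += 1
--
--         if batch_capacity == 0 or sample_ind == len(samples) - 1:
--
--             occurrences_per_batch.append(batch_occurrences)
--             schedule_per_batch.append(batch_schedule)
--
--             batch_capacity = batch_size
--             utt_pos_in_batch = dict()
--             sample_seen_in_batch = set()
--             batch_schedule = list()
--             batch_occurrences = list()
--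
--     return schedule_per_batch, occurrences_per_batch
-- ===== SOURCE B (Python) =====
-- def _segment_schedule_occurrences(seg):
--     # seg: list of (global_index, sample) pairs of one batch
--     first = {}
--     for i, s in seg:
--         first.setdefault(s, i)
--     names = [s for _, s in seg]
--     counts = {}
--     for s in names:
--         counts[s] = counts.get(s, 0) + 1
--     return list(first.values()), [counts.get(u, 0) for u in first]
--
--
-- def compute_per_batch_schedule_occurrences(samples, batch_size):
--     # phase 1: cut the stream into segments, closing one whenever
--     # batch_size distinct samples have been collected
--     segments = []
--     seg = []
--     distinct = set()
--     for i, s in enumerate(samples):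
--         seg.append((i, s))
--         distinct.add(s)
--         if len(distinct) == batch_size:
--             segments.append(seg)
--             seg = []
--             distinct = set()
--     if seg:
--         segments.append(seg)
--     # phase 2: per segment, first-occurrence indices and per-sample counts
--     schedule_per_batch = []
--     occurrences_per_batch = []
--     for seg in segments:
--         sched, occ = _segment_schedule_occurrences(seg)
--         schedule_per_batch.append(sched)
--         occurrences_per_batch.append(occ)
--     return schedule_per_batch, occurrences_per_batch
-- ===== Notes on version B (the rewrite author's own statement) =====
-- stated objective: alternative
-- what changed: Replaces A's single pass with seven pieces of mutable per-batch state (seen-set, position dict, in-place counter increments at looked-up positions, capacity countdown) by a two-phase decomposition: phase 1 only cuts the stream into segments of (index, sample) pairs, phase 2 derives each batch's schedule and occurrence counts per segment via dict.setdefault for first indices and a counts dict.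
import Mathlib
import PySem

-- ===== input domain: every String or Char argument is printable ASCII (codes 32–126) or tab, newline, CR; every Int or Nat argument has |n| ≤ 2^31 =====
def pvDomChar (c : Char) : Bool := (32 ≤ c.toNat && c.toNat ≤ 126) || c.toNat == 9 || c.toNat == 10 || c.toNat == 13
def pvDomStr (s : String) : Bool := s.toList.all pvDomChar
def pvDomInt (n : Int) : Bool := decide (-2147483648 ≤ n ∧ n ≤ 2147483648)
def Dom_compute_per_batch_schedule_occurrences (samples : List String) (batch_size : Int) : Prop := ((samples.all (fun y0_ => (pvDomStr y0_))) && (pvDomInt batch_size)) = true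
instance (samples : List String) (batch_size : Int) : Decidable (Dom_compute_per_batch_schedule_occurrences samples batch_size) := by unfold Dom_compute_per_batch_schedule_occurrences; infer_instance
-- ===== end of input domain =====

-- B re-decomposes A's single stateful pass into two phases (segment cutting, then per-segment
-- schedule/count derivation); same return value, no side effects in either version.

-- ===== PORT A =====
-- A's loop state: the seven mutable locals of the Python loop.
structure PvStA where
  occ_pb : List (List Int)
  sched_pb : List (List Int)
  seen : PySem.Set String
  pos : PySem.Dict String Int
  bocc : List Int
  bsched : List Int
  cap : Int
deriving Repr, DecidableEq

-- body of A's for-loop before the flush check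
def pvStepA1 (st : PvStA) (p : Int × String) : PvStA :=
  if st.seen.contains p.2 = false then
    { st with bsched := st.bsched ++ [p.1],
              seen := st.seen.add p.2,
              pos := st.pos.insert p.2 (st.bocc.length : Int),
              bocc := st.bocc ++ [1],
              cap := st.cap - 1 }
  else
    -- Python: batch_idx = utt_pos_in_batch[sample]. The key is always present here (seen and
    -- utt_pos_in_batch are reset together and filled together), so .getD 0 never yields the
    -- default, and the stored value is a nonnegative in-range list position, so .toNat is exact.
    let idx := (st.pos.get? p.2).getD 0
    { st with bocc := st.bocc.modify idx.toNat (· + 1) }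

def pvStepA (n bs : Int) (st : PvStA) (p : Int × String) : PvStA :=
  let st1 := pvStepA1 st p
  if st1.cap = 0 ∨ p.1 = n - 1 then
    { occ_pb := st1.occ_pb ++ [st1.bocc], sched_pb := st1.sched_pb ++ [st1.bsched],
      seen := PySem.Set.empty, pos := PySem.Dict.mk [], bocc := [], bsched := [], cap := bs }
  else st1

def compute_per_batch_schedule_occurrences (samples : List String) (batch_size : Int) : List (List Int) × List (List Int) :=
  let st := (PySem.List.enumerate samples).foldl (pvStepA (samples.length : Int) batch_size)
    { occ_pb := [], sched_pb := [], seen := PySem.Set.empty, pos := PySem.Dict.mk [],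
      bocc := [], bsched := [], cap := batch_size }
  (st.sched_pb, st.occ_pb)

-- ===== PORT B =====
-- Source B helper _segment_schedule_occurrences: first-occurrence dict, then values / counts
def pvFirst (seg : List (Int × String)) : PySem.Dict String Int :=
  seg.foldl (fun d p => d.setdefault p.2 p.1) (PySem.Dict.mk [])

-- counts loop of _segment_schedule_occurrences: counts[s] = counts.get(s, 0) + 1
def pvCounts (names : List String) : PySem.Dict String Int :=
  names.foldl (fun d x => d.insert x (d.getD x 0 + 1)) (PySem.Dict.mk [])

def pvPhase2 (seg : List (Int × String)) : List Int × List Int :=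
  let first := pvFirst seg
  let names := seg.map (·.2)
  let counts := pvCounts names
  (first.values, first.keys.map (fun u => counts.getD u 0))

-- phase-1 loop body: extend the open segment, close it on batch_size distinct samples
def pvStepB (bs : Int) (st : List (List (Int × String)) × List (Int × String) × PySem.Set String)
    (p : Int × String) : List (List (Int × String)) × List (Int × String) × PySem.Set String :=
  let seg := st.2.1 ++ [p]
  let distinct := st.2.2.add p.2
  if (distinct.length : Int) = bs then (st.1 ++ [seg], [], PySem.Set.empty)
  else (st.1, seg, distinct)

-- after the phase-1 loop: append the trailing non-empty segment, then run phase 2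
def pvFinish (st : List (List (Int × String)) × List (Int × String) × PySem.Set String) :
    List (List Int) × List (List Int) :=
  let segments := if st.2.1 ≠ [] then st.1 ++ [st.2.1] else st.1
  segments.foldl (fun acc seg => (acc.1 ++ [(pvPhase2 seg).1], acc.2 ++ [(pvPhase2 seg).2])) ([], [])

def compute_per_batch_schedule_occurrences_alt (samples : List String) (batch_size : Int) : List (List Int) × List (List Int) :=
  pvFinish ((PySem.List.enumerate samples).foldl (pvStepB batch_size) ([], [], PySem.Set.empty))

-- ===== PRECONDITION & SPEC =====
def Spec_compute_per_batch_schedule_occurrences (samples : List String) (batch_size : Int) (out : List (List Int) × List (List Int)) : Prop := out = compute_per_batch_schedule_occurrences_alt samples batch_size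
instance (samples : List String) (batch_size : Int) (out : List (List Int) × List (List Int)) : Decidable (Spec_compute_per_batch_schedule_occurrences samples batch_size out) := by unfold Spec_compute_per_batch_schedule_occurrences; infer_instance

-- ===== CLAIM (what is proved, stated in full; the proofs are below) =====
def Claim_equal_compute_per_batch_schedule_occurrences : Prop := ∀ (samples : List String) (batch_size : Int), Dom_compute_per_batch_schedule_occurrences samples batch_size → Spec_compute_per_batch_schedule_occurrences samples batch_size (compute_per_batch_schedule_occurrences samples batch_size)

-- ===== LEMMAS AND PROOFS =====

-- The invariant tying A's seven loop variables to B's phase-1 state (segs, seg, distinct).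
def pvInv (bs : Int) (st : PvStA) (segs : List (List (Int × String)))
    (seg : List (Int × String)) (distinct : PySem.Set String) : Prop :=
  st.sched_pb = segs.map (fun g => (pvPhase2 g).1) ∧
  st.occ_pb = segs.map (fun g => (pvPhase2 g).2) ∧
  st.bsched = (pvFirst seg).values ∧
  st.bocc = (pvFirst seg).keys.map (fun u => ((seg.map (·.2)).count u : Int)) ∧
  st.seen = (pvFirst seg).keys ∧
  distinct = (pvFirst seg).keys ∧
  st.cap = bs - ((pvFirst seg).keys.length : Int) ∧
  (∀ s ∈ (pvFirst seg).keys, st.pos.get? s = some (((pvFirst seg).keys.idxOf s : Nat) : Int)) ∧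
  (pvFirst seg).keys.Nodup ∧
  (∀ s, s ∈ (pvFirst seg).keys ↔ s ∈ seg.map (·.2))

lemma pvCounts_getD (names : List String) (u : String) :
    (pvCounts names).getD u 0 = (names.count u : Int) := by
  have h0 : (PySem.Dict.mk [] : PySem.Dict String Int).getD u 0 = 0 := rfl
  simpa [pvCounts, h0] using PySem.Dict.getD_foldl_insert_add_one names (PySem.Dict.mk []) u

lemma pvFirst_append (seg : List (Int × String)) (p : Int × String) :
    pvFirst (seg ++ [p]) = (pvFirst seg).setdefault p.2 p.1 := by
  simp [pvFirst]

lemma pvModify_idxOf_map (c : String → Int) (x : String) (K : List String)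
    (hnd : K.Nodup) (_hx : x ∈ K) :
    (K.map c).modify (K.idxOf x) (· + 1) = K.map (fun u => c u + if u = x then 1 else 0) := by
  apply List.ext_getElem
  · simp
  · intro j hj1 hj2
    have hjK : j < K.length := by simpa using hj2
    rw [List.getElem_modify]
    simp only [List.getElem_map]
    by_cases hij : K.idxOf x = j
    · have hKj : K[j] = x := by
        subst hij; exact List.getElem_idxOf _
      simp [hij, hKj]
    · have hKj : K[j] ≠ x := by
        intro he
        exact hij (by rw [← he]; exact List.Nodup.idxOf_getElem hnd j hjK)
      simp [hij, hKj]

-- accumulating the two appended output lists of B's second loop is a pair of maps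
lemma pvFold_phase2 (l : List (List (Int × String))) (a b : List (List Int)) :
    l.foldl (fun acc seg => (acc.1 ++ [(pvPhase2 seg).1], acc.2 ++ [(pvPhase2 seg).2])) (a, b) =
    (a ++ l.map (fun s => (pvPhase2 s).1), b ++ l.map (fun s => (pvPhase2 s).2)) := by
  induction l generalizing a b with
  | nil => simp
  | cons s t ih => simp [ih]

lemma pvFinish_eq (st : List (List (Int × String)) × List (Int × String) × PySem.Set String) :
    pvFinish st = ((if st.2.1 ≠ [] then st.1 ++ [st.2.1] else st.1).map (fun s => (pvPhase2 s).1),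
                   (if st.2.1 ≠ [] then st.1 ++ [st.2.1] else st.1).map (fun s => (pvPhase2 s).2)) := by
  simp [pvFinish, pvFold_phase2]

-- the loop body preserves the invariant (before either side's flush check)
lemma pvStep_core (bs : Int) (stA : PvStA) (segs : List (List (Int × String)))
    (seg : List (Int × String)) (distinct : PySem.Set String) (p : Int × String)
    (h : pvInv bs stA segs seg distinct) :
    pvInv bs (pvStepA1 stA p) segs (seg ++ [p]) (PySem.Set.add distinct p.2) := by
  obtain ⟨h1, h2, h3, h4, h5, h6, h7, h8, h9, h10⟩ := h
  by_cases hmem : p.2 ∈ (pvFirst seg).keys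
  · -- duplicate sample within the open batch
    have hcont : (pvFirst seg).contains p.2 = true := (PySem.Dict.contains_iff_mem_keys _ _).mpr hmem
    have hd' : pvFirst (seg ++ [p]) = pvFirst seg := by
      rw [pvFirst_append, PySem.Dict.setdefault_of_contains _ _ hcont]
    have hseenM : p.2 ∈ stA.seen := by rw [h5]; exact hmem
    have hstep : pvStepA1 stA p =
        { stA with bocc := stA.bocc.modify ((stA.pos.get? p.2).getD 0).toNat (· + 1) } := by
      simp [pvStepA1, hseenM]
    have hidx : ((stA.pos.get? p.2).getD 0).toNat = (pvFirst seg).keys.idxOf p.2 := by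
      rw [h8 p.2 hmem]; simp
    refine ⟨by rw [hstep]; exact h1, by rw [hstep]; exact h2, ?_, ?_, ?_, ?_, ?_, ?_, ?_, ?_⟩
    · rw [hstep, hd']; exact h3
    · rw [hstep, hd']
      show stA.bocc.modify ((stA.pos.get? p.2).getD 0).toNat (· + 1) = _
      rw [hidx, h4, pvModify_idxOf_map _ _ _ h9 hmem]
      refine List.map_congr_left ?_
      intro u hu
      by_cases hup : u = p.2
      · subst hup; simp [List.count_append]
      · have : p.2 ≠ u := Ne.symm hup
        simp [List.count_append, hup, this]
    · rw [hstep, hd']; exact h5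
    · rw [hd', PySem.Set.add]
      simp [h6, hmem]
    · rw [hstep, hd']; exact h7
    · intro s hs
      rw [hd'] at hs ⊢
      rw [hstep]
      exact h8 s hs
    · rw [hd']; exact h9
    · intro s
      rw [hd']
      simp only [List.map_append, List.mem_append, List.map_cons, List.map_nil,
        List.mem_cons, List.not_mem_nil, or_false]
      constructor
      · intro hs; exact Or.inl ((h10 s).mp hs)
      · rintro (hs | rfl)
        · exact (h10 s).mpr hs
        · exact hmem
  · -- fresh sample: both sides append it
    have hcont : (pvFirst seg).contains p.2 = false :=
      Bool.eq_false_iff.mpr (fun hc => hmem ((PySem.Dict.contains_iff_mem_keys _ _).mp hc))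
    have hd' : pvFirst (seg ++ [p]) = (pvFirst seg).insert p.2 p.1 := by
      rw [pvFirst_append, PySem.Dict.setdefault_of_not_contains _ _ hcont]
    have hkeys' : (pvFirst (seg ++ [p])).keys = (pvFirst seg).keys ++ [p.2] := by
      rw [hd', PySem.Dict.keys_insert_of_not_contains _ _ hcont]
    have hvals' : (pvFirst (seg ++ [p])).values = (pvFirst seg).values ++ [p.1] := by
      rw [hd']
      simp [PySem.Dict.values, PySem.Dict.items_insert_of_not_contains _ _ hcont]
    have hnames : p.2 ∉ seg.map (·.2) := fun hx => hmem ((h10 p.2).mpr hx)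
    have hseenM : p.2 ∉ stA.seen := by rw [h5]; exact hmem
    have hstep : pvStepA1 stA p =
        { stA with bsched := stA.bsched ++ [p.1], seen := stA.seen.add p.2,
                   pos := stA.pos.insert p.2 (stA.bocc.length : Int),
                   bocc := stA.bocc ++ [1], cap := stA.cap - 1 } := by
      simp [pvStepA1, hseenM]
    have hblen : stA.bocc.length = (pvFirst seg).keys.length := by rw [h4]; simp
    refine ⟨by rw [hstep]; exact h1, by rw [hstep]; exact h2, ?_, ?_, ?_, ?_, ?_, ?_, ?_, ?_⟩
    · rw [hstep, hvals']
      show stA.bsched ++ [p.1] = _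
      rw [h3]
    · rw [hstep, hkeys']
      show stA.bocc ++ [1] = _
      have e1 : ((pvFirst seg).keys).map (fun u => (((seg ++ [p]).map (·.2)).count u : Int)) = stA.bocc := by
        rw [h4]
        refine List.map_congr_left ?_
        intro u hu
        have hup : p.2 ≠ u := fun e => hmem (e ▸ hu)
        simp [List.count_append, hup]
      have e2 : (((seg ++ [p]).map (·.2)).count p.2 : Int) = 1 := by
        simp [List.count_append, List.count_eq_zero.mpr hnames]
      rw [List.map_append]
      simp only [List.map_cons, List.map_nil]
      rw [e1, e2]
    · rw [hstep, hkeys']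
      show stA.seen.add p.2 = _
      rw [PySem.Set.add]
      simp [h5, hmem]
    · rw [hkeys', PySem.Set.add]
      simp [h6, hmem]
    · rw [hstep, hkeys']
      show stA.cap - 1 = _
      rw [h7]
      simp only [List.length_append, List.length_cons, List.length_nil]
      push_cast
      omega
    · intro s hs
      rw [hkeys'] at hs ⊢
      rw [hstep]
      show (stA.pos.insert p.2 (stA.bocc.length : Int)).get? s = _
      rcases List.mem_append.mp hs with hsK | hsp
      · have hsne : s ≠ p.2 := fun e => hmem (e ▸ hsK)
        rw [PySem.Dict.get?_insert_of_ne _ _ hsne, h8 s hsK]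
        rw [List.idxOf_append]
        simp [hsK]
      · have hsp2 : s = p.2 := by simpa using hsp
        subst hsp2
        rw [PySem.Dict.get?_insert_self, hblen]
        rw [List.idxOf_append]
        simp [hmem]
    · rw [hkeys', List.nodup_append]
      refine ⟨h9, List.nodup_singleton _, ?_⟩
      intro a ha b hb
      simp only [List.mem_singleton] at hb
      subst hb
      exact fun e => hmem (e ▸ ha)
    · intro s
      rw [hkeys']
      simp only [List.map_append, List.mem_append, List.map_cons, List.map_nil,
        List.mem_cons, List.not_mem_nil, or_false]
      constructor
      · rintro (hs | rfl)
        · exact Or.inl ((h10 s).mp hs)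
        · exact Or.inr rfl
      · rintro (hs | rfl)
        · exact Or.inl ((h10 s).mpr hs)
        · exact Or.inr rfl

-- a flush re-establishes the invariant with the closed segment recorded
lemma pvInv_flush (bs : Int) (st1 : PvStA) (segs : List (List (Int × String)))
    (seg' : List (Int × String)) (dis' : PySem.Set String)
    (h : pvInv bs st1 segs seg' dis') :
    pvInv bs
      { occ_pb := st1.occ_pb ++ [st1.bocc], sched_pb := st1.sched_pb ++ [st1.bsched],
        seen := PySem.Set.empty, pos := PySem.Dict.mk [], bocc := [], bsched := [], cap := bs }
      (segs ++ [seg']) [] PySem.Set.empty := by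
  obtain ⟨h1, h2, h3, h4, _⟩ := h
  refine ⟨by simp [h1, h3, pvPhase2], by simp [h2, h4, pvPhase2, pvCounts_getD], rfl, rfl, rfl, rfl,
    by simp [pvFirst], ?_, by simp [pvFirst, PySem.Dict.keys], by intro s; simp [pvFirst, PySem.Dict.keys]⟩
  intro s hs
  simp [pvFirst, PySem.Dict.keys] at hs

-- main loop correspondence: folding the remaining enumerated suffix on both sides
lemma pvLoop (bs n : Int) (rest : List String) :
    ∀ (g : Int), g + rest.length = n →
    ∀ (stA : PvStA) (segs : List (List (Int × String))) (seg : List (Int × String))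
      (distinct : PySem.Set String),
    pvInv bs stA segs seg distinct →
    (rest = [] → seg = []) →
    (((PySem.List.enumerate rest g).foldl (pvStepA n bs) stA).sched_pb,
     ((PySem.List.enumerate rest g).foldl (pvStepA n bs) stA).occ_pb) =
      pvFinish ((PySem.List.enumerate rest g).foldl (pvStepB bs) (segs, seg, distinct)) := by
  induction rest with
  | nil =>
    intro g hg stA segs seg distinct hInv hemp
    have hseg := hemp rfl
    subst hseg
    obtain ⟨h1, h2, _⟩ := hInv
    have h0 : PySem.List.enumerate ([] : List String) g = [] := rfl
    rw [h0]
    simp only [List.foldl_nil]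
    rw [pvFinish_eq]
    simp [h1, h2]
  | cons x r ih =>
    intro g hg stA segs seg distinct hInv hemp
    have henum : PySem.List.enumerate (x :: r) g = (g, x) :: PySem.List.enumerate r (g + 1) := rfl
    rw [henum]
    simp only [List.foldl_cons]
    have hcore := pvStep_core bs stA segs seg distinct (g, x) hInv
    have hcond : ((pvStepA1 stA (g, x)).cap = 0) ↔ (((PySem.Set.add distinct x).length : Int) = bs) := by
      obtain ⟨_, _, _, _, _, h6, h7, _⟩ := hcore
      have h6' : PySem.Set.add distinct x = (pvFirst (seg ++ [(g, x)])).keys := h6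
      rw [h7, ← h6']
      omega
    by_cases hlast : r = []
    · -- last sample: A flushes unconditionally, B closes the trailing segment
      subst hlast
      have hgn : g = n - 1 := by simp at hg; omega
      have hAstep : pvStepA n bs stA (g, x) =
          { occ_pb := (pvStepA1 stA (g, x)).occ_pb ++ [(pvStepA1 stA (g, x)).bocc],
            sched_pb := (pvStepA1 stA (g, x)).sched_pb ++ [(pvStepA1 stA (g, x)).bsched],
            seen := PySem.Set.empty, pos := PySem.Dict.mk [], bocc := [], bsched := [], cap := bs } := by
        simp [pvStepA, hgn]
      obtain ⟨h1, h2, h3, h4, _⟩ := hcore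
      rw [hAstep]
      have h0 : PySem.List.enumerate ([] : List String) (g + 1) = [] := rfl
      rw [h0]
      simp only [List.foldl_nil]
      by_cases hB : ((PySem.Set.add distinct x).length : Int) = bs
      · have hBstep : pvStepB bs (segs, seg, distinct) (g, x) =
            (segs ++ [seg ++ [(g, x)]], [], PySem.Set.empty) := by
          simp [pvStepB, hB]
        rw [hBstep, pvFinish_eq]
        simp [h1, h2, h3, h4, pvPhase2, pvCounts_getD]
      · have hBstep : pvStepB bs (segs, seg, distinct) (g, x) =
            (segs, seg ++ [(g, x)], PySem.Set.add distinct x) := by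
          simp [pvStepB, hB]
        rw [hBstep, pvFinish_eq]
        have hne : seg ++ [(g, x)] ≠ [] := by simp
        simp [hne, h1, h2, h3, h4, pvPhase2, pvCounts_getD]
    · -- not the last sample
      have hgn : g ≠ n - 1 := by
        have hr : 1 ≤ r.length := by
          cases r with
          | nil => exact absurd rfl hlast
          | cons _ _ => simp
        simp at hg
        omega
      by_cases hB : ((PySem.Set.add distinct x).length : Int) = bs
      · have hcap : (pvStepA1 stA (g, x)).cap = 0 := hcond.mpr hB
        have hAstep : pvStepA n bs stA (g, x) =
            { occ_pb := (pvStepA1 stA (g, x)).occ_pb ++ [(pvStepA1 stA (g, x)).bocc],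
              sched_pb := (pvStepA1 stA (g, x)).sched_pb ++ [(pvStepA1 stA (g, x)).bsched],
              seen := PySem.Set.empty, pos := PySem.Dict.mk [], bocc := [], bsched := [], cap := bs } := by
          simp [pvStepA, hcap]
        have hBstep : pvStepB bs (segs, seg, distinct) (g, x) =
            (segs ++ [seg ++ [(g, x)]], [], PySem.Set.empty) := by
          simp [pvStepB, hB]
        rw [hAstep, hBstep]
        exact ih (g + 1) (by simp at hg ⊢; omega) _ _ _ _ (pvInv_flush bs _ _ _ _ hcore)
          (fun _ => rfl)
      · have hcap : ¬ (pvStepA1 stA (g, x)).cap = 0 := fun hc => hB (hcond.mp hc)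
        have hAstep : pvStepA n bs stA (g, x) = pvStepA1 stA (g, x) := by
          simp [pvStepA, hcap, hgn]
        have hBstep : pvStepB bs (segs, seg, distinct) (g, x) =
            (segs, seg ++ [(g, x)], PySem.Set.add distinct x) := by
          simp [pvStepB, hB]
        rw [hAstep, hBstep]
        exact ih (g + 1) (by simp at hg ⊢; omega) _ _ _ _ hcore (fun hr => absurd hr hlast)

-- ===== VERDICT (by name: the statement is the Claim_ definition above) =====
theorem compute_per_batch_schedule_occurrences_spec : Claim_equal_compute_per_batch_schedule_occurrences := by
  intro samples batch_size _
  unfold Spec_compute_per_batch_schedule_occurrences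
  simp only [compute_per_batch_schedule_occurrences, compute_per_batch_schedule_occurrences_alt]
  exact pvLoop batch_size (samples.length : Int) samples 0 (by simp) _ [] [] PySem.Set.empty
    ⟨rfl, rfl, rfl, rfl, rfl, rfl, by simp, by intro s hs; simp [pvFirst, PySem.Dict.keys] at hs,
     by simp [pvFirst, PySem.Dict.keys], by intro s; simp [pvFirst, PySem.Dict.keys]⟩
    (fun _ => rfl)
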